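-- pv_equiv track=rewrite | github.com/saltymermaid/aoc_2023 | advent3.py | get_next_part
-- ===== SOURCE A (Python) =====
-- def is_number(n):
--     is_num = True
--     try:
--         int(n)
--     except ValueError:
--         is_num = False
--     return is_num
--
-- def get_next_part(row):
--     end = 0
--     for idx, char in enumerate(row):
--         if is_number(char):
--             end += 1
--         else:
--             return row[:end]
--     return ''
-- ===== SOURCE B (Python) =====
-- def get_next_part(row):
--     rest = row.lstrip('0123456789')
--     return row[:len(row) - len(rest)]
-- ===== Notes on version B (the rewrite author's own statement) =====
-- stated objective: simpler
-- what changed: Replaced the char-by-char loop with its try/except int() digit test by a single lstrip of the digit set plus one slice, so the leading digit run is computed without any explicit loop.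
-- intended difference: On nonempty rows made entirely of digits A falls off its loop and returns '' while B returns the whole row, which is the leading digit run the function is meant to extract. — e.g. on get_next_part("12"): A returns "", B returns "12"
import Mathlib
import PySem

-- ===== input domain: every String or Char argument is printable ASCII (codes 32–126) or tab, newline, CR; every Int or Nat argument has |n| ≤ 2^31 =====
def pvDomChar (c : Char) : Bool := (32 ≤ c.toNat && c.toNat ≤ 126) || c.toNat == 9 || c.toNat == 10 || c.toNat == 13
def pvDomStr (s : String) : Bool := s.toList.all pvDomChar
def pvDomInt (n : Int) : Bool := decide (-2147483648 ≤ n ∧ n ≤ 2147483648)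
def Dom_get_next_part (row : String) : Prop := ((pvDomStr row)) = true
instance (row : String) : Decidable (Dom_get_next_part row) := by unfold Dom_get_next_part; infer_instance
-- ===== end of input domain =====

-- B replaces A's char-by-char loop (with its try/except int() test) by one lstrip of the
-- digit set plus a slice; B differs intentionally on nonempty all-digit rows (see D_ below).

-- ===== PORT A =====
def is_number (n : String) : Bool := (PySem.Int.ofStr? n).isSome  -- int(n) succeeds

-- the for-loop of A: walks the remaining chars, `e` is A's `end` counter
def gnpLoop (row : String) : List Char → Nat → String
  | [], _ => ""                                   -- loop finished: return ''
  | c :: rest, e =>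
    if is_number (String.ofList [c]) then gnpLoop row rest (e + 1)
    else PySem.Str.slice row none (some (e : Int))  -- row[:end]

def get_next_part (row : String) : String := gnpLoop row row.toList 0

-- ===== PORT B =====
def pvDigits : List Char := ['0','1','2','3','4','5','6','7','8','9']

-- row.lstrip('0123456789'): drop leading chars belonging to the digit set (exact: lstrip with
-- a chars argument removes exactly the maximal leading run of chars in the set)
def get_next_part_alt (row : String) : String :=
  let rest := row.toList.dropWhile (fun c => decide (c ∈ pvDigits))
  PySem.Str.slice row none (some ((row.toList.length - rest.length : Nat) : Int))

-- ===== PRECONDITION & SPEC =====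
-- On nonempty rows made entirely of digits A falls off its loop and returns '' while B
-- returns the whole row, which is the leading digit run the function is meant to extract.
def D_get_next_part (row : String) : Prop :=
  row ≠ "" ∧ row.toList.all (fun c => decide ('0' ≤ c ∧ c ≤ '9')) = true
instance (row : String) : Decidable (D_get_next_part row) := by unfold D_get_next_part; infer_instance

def Spec_get_next_part (row : String) (out : String) : Prop :=
  ¬ D_get_next_part row → out = get_next_part_alt row
instance (row : String) (out : String) : Decidable (Spec_get_next_part row out) := by unfold Spec_get_next_part; infer_instance

def pvDiffWitness_get_next_part : String := "12"
def pvDiffWitnessOut_get_next_part : String × String := ("", "12")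

-- ===== CLAIM (what is proved, stated in full; the proofs are below) =====
def Claim_unchanged_get_next_part : Prop := ∀ (row : String), Dom_get_next_part row → Spec_get_next_part row (get_next_part row)
def Claim_changed_get_next_part : Prop := Dom_get_next_part (pvDiffWitness_get_next_part) ∧ D_get_next_part (pvDiffWitness_get_next_part) ∧ get_next_part (pvDiffWitness_get_next_part) = pvDiffWitnessOut_get_next_part.1 ∧ get_next_part_alt (pvDiffWitness_get_next_part) = pvDiffWitnessOut_get_next_part.2 ∧ pvDiffWitnessOut_get_next_part.1 ≠ pvDiffWitnessOut_get_next_part.2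
def Claim_exact_get_next_part : Prop := ∀ (row : String), Dom_get_next_part row → D_get_next_part row → get_next_part row ≠ get_next_part_alt row

-- ===== LEMMAS AND PROOFS =====

-- the digit set of B's lstrip is exactly the char range '0'..'9'
lemma digit_mem (c : Char) : (c ∈ pvDigits) ↔ ('0' ≤ c ∧ c ≤ '9') := by
  constructor
  · intro h; fin_cases h <;> exact ⟨by decide, by decide⟩
  · rintro ⟨h1, h2⟩
    have h1' : 48 ≤ c.toNat := by simpa [Char.le_def, UInt32.le_iff_toNat_le] using h1
    have h2' : c.toNat ≤ 57 := by simpa [Char.le_def, UInt32.le_iff_toNat_le] using h2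
    have hc := (Char.ofNat_toNat c).symm
    interval_cases h : c.toNat <;> (rw [hc]; decide)

lemma all_digit_iff (l : List Char) :
    (l.all (fun c => decide (c ∈ pvDigits))) = (l.all (fun c => decide ('0' ≤ c ∧ c ≤ '9'))) := by
  rw [show (fun c => decide (c ∈ pvDigits)) = (fun c => decide ('0' ≤ c ∧ c ≤ '9')) from
    funext fun c => by simp [digit_mem]]

-- int(char) accepts exactly the ten ASCII digits, for any char in the input domain
lemma is_number_char (c : Char) (h : pvDomChar c = true) :
    is_number (String.ofList [c]) = decide (c ∈ pvDigits) := by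
  have hlt : c.toNat < 128 := by
    simp [pvDomChar] at h
    omega
  have henum : ∀ n < 128,
      (PySem.Int.ofChars? [Char.ofNat n]).isSome = decide (Char.ofNat n ∈ pvDigits) := by decide
  have := henum c.toNat hlt
  rw [Char.ofNat_toNat] at this
  simpa [is_number, PySem.Int.ofStr?, String.toList_ofList] using this

-- characterisation of A's loop on a suffix of the row whose chars are in the domain
lemma gnpLoop_eq (row : String) :
    ∀ (cs : List Char) (e : Nat), (∀ c ∈ cs, pvDomChar c = true) →
      gnpLoop row cs e =
        if cs.all (fun c => decide (c ∈ pvDigits)) then ""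
        else PySem.Str.slice row none
          (some (((e + (cs.takeWhile (fun c => decide (c ∈ pvDigits))).length : Nat) : Int))) := by
  intro cs
  induction cs with
  | nil => intro e _; simp [gnpLoop]
  | cons c rest ih =>
    intro e hdom
    have hc := is_number_char c (hdom c (by simp))
    by_cases hd : c ∈ pvDigits
    · have hb : is_number (String.ofList [c]) = true := by simp [hc, hd]
      rw [gnpLoop, hb, if_pos rfl, ih (e + 1) (fun x hx => hdom x (by simp [hx]))]
      by_cases hall : rest.all (fun c => decide (c ∈ pvDigits)) = true
      · simp [hall, hd]
      · rw [if_neg (by simpa using hall), if_neg (by simp [hd]; simpa using hall)]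
        simp [hd]
        ring_nf
    · have hb : is_number (String.ofList [c]) = false := by simp [hc, hd]
      rw [gnpLoop, hb]
      simp [List.all_cons, hd]

lemma lengths_eq (l : List Char) (p : Char → Bool) :
    l.length - (l.dropWhile p).length = (l.takeWhile p).length := by
  have h := congrArg List.length (List.takeWhile_append_dropWhile (p := p) (l := l))
  simp only [List.length_append] at h
  omega

theorem get_next_part_spec : Claim_unchanged_get_next_part := by
  intro row hdom hD
  have hdom' : ∀ c ∈ row.toList, pvDomChar c = true := by
    simpa [Dom_get_next_part, pvDomStr, List.all_eq_true] using hdom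
  unfold get_next_part
  simp only [get_next_part_alt]
  rw [gnpLoop_eq row row.toList 0 hdom']
  rw [lengths_eq]
  simp only [Nat.zero_add]
  by_cases hall : row.toList.all (fun c => decide (c ∈ pvDigits)) = true
  · -- all chars digits: ¬D forces row = ""
    have hrow : row = "" := by
      by_contra hne
      exact hD ⟨hne, by rw [← all_digit_iff]; exact hall⟩
    subst hrow
    decide
  · rw [if_neg (by simpa using hall)]

theorem get_next_part_changed : Claim_changed_get_next_part := by
  unfold Claim_changed_get_next_part; decide

theorem get_next_part_tight : Claim_exact_get_next_part := by
  intro row hdom hD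
  obtain ⟨hne, hall'⟩ := hD
  have hall : row.toList.all (fun c => decide (c ∈ pvDigits)) = true := by
    rw [all_digit_iff]; exact hall'
  have hdom' : ∀ c ∈ row.toList, pvDomChar c = true := by
    simpa [Dom_get_next_part, pvDomStr, List.all_eq_true] using hdom
  unfold get_next_part get_next_part_alt
  rw [gnpLoop_eq row row.toList 0 hdom', if_pos hall]
  intro h
  -- B's value has the full row as its char list, and row is nonempty
  have hdrop : row.toList.dropWhile (fun c => decide (c ∈ pvDigits)) = [] := by
    apply List.dropWhile_eq_nil_iff.mpr
    intro x hx
    exact (List.all_eq_true.mp hall) x hx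
  have hlist := congrArg String.toList h.symm
  rw [PySem.Str.toList_slice] at hlist
  simp [hdrop, PySem.List.slice_to_natCast] at hlist
  exact hne hlist
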